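-- pv_equiv track=rewrite | github.com/JunOnJuly/BaekJoon | 백준/Silver/2217. 로프/로프.py | solution
-- ===== SOURCE A (Python) =====
-- def solution(N, data_list):
--     # 리스트 정렬
--     data_list = sorted(data_list)
--     # 최댓값
--     max_value = 0
--     # 정렬 후 낮은 밧줄부터 제거하면서 비교
--     # 중간값만 빼볼 필요는 없음
--     for idx in range(N):
--         # 제일 낮은 값 X 밧줄 수
--         value_sum = data_list[idx] * (N-idx)
--         if value_sum > max_value:
--             max_value = value_sum
--
--     return max_value
-- ===== SOURCE B (Python) =====
-- def solution(N, data_list):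
--     # Sort-free alternative: for each rope weight v, the number of usable ropes
--     # (among the N weakest, i.e. ropes not lighter than v) is N minus the count
--     # of strictly lighter ropes; take the best positive product.
--     best = 0
--     for v in data_list:
--         c = N - sum(1 for r in data_list if r < v)
--         if c > 0 and v * c > best:
--             best = v * c
--     return best
-- ===== Notes on version B (the rewrite author's own statement) =====
-- stated objective: alternative
-- what changed: Replaced sort-then-indexed-sweep with a sort-free double scan: for each rope weight v, count the strictly lighter ropes to get the number of usable ropes among the N weakest and keep the best positive product.
import Mathlib
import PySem

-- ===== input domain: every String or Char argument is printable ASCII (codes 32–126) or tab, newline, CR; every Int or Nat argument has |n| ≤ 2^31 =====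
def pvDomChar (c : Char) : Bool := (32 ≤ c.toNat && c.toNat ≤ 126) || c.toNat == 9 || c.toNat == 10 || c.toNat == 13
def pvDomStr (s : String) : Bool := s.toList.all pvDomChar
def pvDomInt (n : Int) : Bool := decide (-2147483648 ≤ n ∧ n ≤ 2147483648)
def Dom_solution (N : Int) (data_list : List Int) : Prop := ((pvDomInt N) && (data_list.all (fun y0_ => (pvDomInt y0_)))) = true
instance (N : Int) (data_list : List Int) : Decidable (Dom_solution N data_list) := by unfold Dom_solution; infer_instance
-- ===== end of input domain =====

-- B replaces A's sort-then-indexed-sweep by a sort-free count-based double scan (alternative decomposition, same results).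

-- ===== PORT A =====
def solution (N : Int) (data_list : List Int) : Int :=
  let dl := PySem.List.sorted data_list (fun x => x) false
  (PySem.List.pyRange 0 N 1).foldl
    (fun max_value idx =>
      let value_sum := PySem.List.pyGetD dl idx 0 * (N - idx)
      if value_sum > max_value then value_sum else max_value) 0

-- ===== PORT B =====
def solution_alt (N : Int) (data_list : List Int) : Int :=
  data_list.foldl
    (fun best v =>
      let c := N - (data_list.countP (fun r => decide (r < v)) : Int)
      if 0 < c ∧ best < v * c then v * c else best) 0

-- ===== PRECONDITION & SPEC =====
-- A raises IndexError when N exceeds the number of ropes (data_list[idx] out of range); exactly those inputs are excluded.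
def Pre_solution (N : Int) (data_list : List Int) : Prop := N ≤ (data_list.length : Int)
instance (N : Int) (data_list : List Int) : Decidable (Pre_solution N data_list) := by unfold Pre_solution; infer_instance
def pvWitness_solution : Int × List Int := (3, [10, 15, 8])

def Spec_solution (N : Int) (data_list : List Int) (out : Int) : Prop := out = solution_alt N data_list
instance (N : Int) (data_list : List Int) (out : Int) : Decidable (Spec_solution N data_list out) := by unfold Spec_solution; infer_instance

-- ===== CLAIM (what is proved, stated in full; the proofs are below) =====
def Claim_equal_solution : Prop := ∀ (N : Int) (data_list : List Int), Dom_solution N data_list → Pre_solution N data_list → Spec_solution N data_list (solution N data_list)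

-- ===== LEMMAS AND PROOFS =====

-- candidate value B considers for a rope weight v
def hCand (N : Int) (l : List Int) (v : Int) : Int :=
  if 0 < N - (l.countP (fun r => decide (r < v)) : Int)
  then v * (N - (l.countP (fun r => decide (r < v)) : Int)) else 0

lemma init_le_foldl_max : ∀ (l : List Int) (a : Int), a ≤ l.foldl max a := by
  intro l
  induction l with
  | nil => intro a; simp
  | cons x xs ih => intro a; exact le_trans (le_max_left a x) (ih (max a x))

lemma mem_le_foldl_max : ∀ (l : List Int) (a x : Int), x ∈ l → x ≤ l.foldl max a := by
  intro l
  induction l with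
  | nil => intro a x hx; simp at hx
  | cons y ys ih =>
    intro a x hx
    rcases List.mem_cons.mp hx with h | h
    · subst h; exact le_trans (le_max_right a x) (init_le_foldl_max ys (max a x))
    · exact ih (max a y) x h

lemma foldl_max_cases : ∀ (l : List Int) (a : Int), l.foldl max a = a ∨ l.foldl max a ∈ l := by
  intro l
  induction l with
  | nil => intro a; left; rfl
  | cons x xs ih =>
    intro a
    rcases ih (max a x) with h | h
    · rcases max_choice a x with h' | h'
      · left; rw [List.foldl_cons, h, h']
      · right; rw [List.foldl_cons, h, h']; exact List.mem_cons_self ..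
    · right; exact List.mem_cons_of_mem _ h

lemma foldl_max_le (l : List Int) (a R : Int) (ha : a ≤ R) (hl : ∀ x ∈ l, x ≤ R) :
    l.foldl max a ≤ R := by
  rcases foldl_max_cases l a with h | h
  · omega
  · exact hl _ h

lemma foldl_if_max {α : Type} (f : α → Int) : ∀ (l : List α) (a : Int),
    l.foldl (fun mx v => if f v > mx then f v else mx) a = l.foldl (fun mx v => max mx (f v)) a := by
  intro l
  induction l with
  | nil => intro a; rfl
  | cons x xs ih =>
    intro a
    have h : (if f x > a then f x else a) = max a (f x) := by split_ifs <;> omega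
    simp only [List.foldl_cons, h, ih]

-- A's fold equals a fold of max over the list of candidates s[i]*(N-i)
lemma solution_eq_foldA (N : Int) (l : List Int) :
    solution N l =
      ((List.range N.toNat).map
        (fun k => (PySem.List.sorted l (fun x => x) false).getD k 0 * (N - (k : Int)))).foldl max 0 := by
  unfold solution
  rw [PySem.List.pyRange_one]
  simp only [List.foldl_map, zero_add, sub_zero, PySem.List.pyGetD_natCast]
  rw [foldl_if_max (fun k => (PySem.List.sorted l (fun x => x) false).getD k 0 * (N - (k : Int)))]

-- B's fold equals a fold of max over the candidates hCand (needs the 0 ≤ best invariant)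
lemma foldB_eq_foldl_max (N : Int) (l : List Int) :
    ∀ (it : List Int) (b : Int), 0 ≤ b →
      it.foldl (fun best v =>
        let c := N - (l.countP (fun r => decide (r < v)) : Int)
        if 0 < c ∧ best < v * c then v * c else best) b
      = (it.map (hCand N l)).foldl max b := by
  intro it
  induction it with
  | nil => intro b _; rfl
  | cons v vs ih =>
    intro b hb
    have hstep : (if 0 < N - (l.countP (fun r => decide (r < v)) : Int) ∧
          b < v * (N - (l.countP (fun r => decide (r < v)) : Int))
        then v * (N - (l.countP (fun r => decide (r < v)) : Int)) else b)
        = max b (hCand N l v) := by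
      unfold hCand; split_ifs <;> omega
    simp only [List.foldl_cons, List.map_cons, hstep]
    exact ih _ (le_trans hb (le_max_left _ _))

lemma solution_alt_eq_foldB (N : Int) (l : List Int) :
    solution_alt N l = (l.map (hCand N l)).foldl max 0 := by
  unfold solution_alt
  exact foldB_eq_foldl_max N l l 0 le_rfl

-- in a ≤-sorted list split as pre ++ x :: post, fewer than |pre| elements are below x
lemma countP_le_of_split (pre post : List Int) (x : Int)
    (h : (pre ++ x :: post).Pairwise (· ≤ ·)) :
    (pre ++ x :: post).countP (fun r => decide (r < x)) ≤ pre.length := by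
  rw [List.countP_append]
  have h2 : (x :: post).Pairwise (α := Int) (· ≤ ·) := (List.pairwise_append.mp h).2.1
  have h3 : ∀ b ∈ post, x ≤ b := (List.pairwise_cons.mp h2).1
  have h0 : (x :: post).countP (fun r => decide (r < x)) = 0 := by
    apply List.countP_eq_zero.mpr
    intro b hb
    simp only [decide_eq_true_eq]
    rcases List.mem_cons.mp hb with hh | hh
    · omega
    · have := h3 b hh; omega
  have := List.countP_le_length (p := fun r => decide (r < x)) (l := pre)
  omega

-- in a ≤-sorted list, any member v sits right after exactly (count of elements below v) elements
lemma exists_split_sorted : ∀ (s : List Int), s.Pairwise (· ≤ ·) → ∀ v ∈ s,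
    ∃ pre post, s = pre ++ v :: post ∧
      pre.length = s.countP (fun r => decide (r < v)) := by
  intro s
  induction s with
  | nil => intro _ v hv; simp at hv
  | cons a t ih =>
    intro hp v hv
    have ha : ∀ b ∈ t, a ≤ b := (List.pairwise_cons.mp hp).1
    have ht : t.Pairwise (· ≤ ·) := (List.pairwise_cons.mp hp).2
    by_cases hav : a < v
    · have hvt : v ∈ t := by
        rcases List.mem_cons.mp hv with h | h
        · omega
        · exact h
      obtain ⟨pre, post, heq, hlen⟩ := ih ht v hvt
      refine ⟨a :: pre, post, by rw [heq]; rfl, ?_⟩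
      simp only [List.length_cons, List.countP_cons, hlen]
      simp [hav]
    · have hva : v = a := by
        rcases List.mem_cons.mp hv with h | h
        · exact h
        · have := ha v h; omega
      subst hva
      have h0 : (v :: t).countP (fun r => decide (r < v)) = 0 := by
        apply List.countP_eq_zero.mpr
        intro b hb
        simp only [decide_eq_true_eq]
        rcases List.mem_cons.mp hb with h | h
        · omega
        · have := ha b h; omega
      exact ⟨[], t, rfl, by simp [h0]⟩

lemma getD_append_length (pre post : List Int) (v d : Int) :
    (pre ++ v :: post).getD pre.length d = v := by
  simp [List.getD_eq_getElem?_getD]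

theorem solution_spec : Claim_equal_solution := by
  intro N l _ hpre
  unfold Spec_solution
  set s := PySem.List.sorted l (fun x => x) false with hs
  have hperm : s.Perm l := PySem.List.sorted_perm l (fun x => x) false
  have hpair : s.Pairwise (· ≤ ·) := by
    have := PySem.List.sorted_pairwise l (fun x => x)
    simpa using this
  have hlen : s.length = l.length := hperm.length_eq
  have hcnt : ∀ v, s.countP (fun r => decide (r < v)) = l.countP (fun r => decide (r < v)) :=
    fun v => hperm.countP_eq _
  have hN : (N.toNat : Int) ≤ l.length := by
    unfold Pre_solution at hpre; omega
  rw [solution_eq_foldA, solution_alt_eq_foldB]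
  set LA := (List.range N.toNat).map (fun k => s.getD k 0 * (N - (k : Int))) with hLA
  set LB := l.map (hCand N l) with hLB
  have hRA0 : (0:Int) ≤ LA.foldl max 0 := init_le_foldl_max _ _
  have hRB0 : (0:Int) ≤ LB.foldl max 0 := init_le_foldl_max _ _
  -- every A-candidate is ≤ B's fold
  have hAB : ∀ x ∈ LA, x ≤ LB.foldl max 0 := by
    intro x hx
    rw [hLA] at hx
    obtain ⟨k, hk, hfx⟩ := List.mem_map.mp hx
    have hkn : k < N.toNat := List.mem_range.mp hk
    have hks : k < s.length := by omega
    have hgd : s.getD k 0 = s[k] := List.getD_eq_getElem s 0 hks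
    set v := s[k] with hv
    have hkN : (k : Int) < N := by omega
    by_cases hvpos : 0 < v
    · have hvs : v ∈ s := List.getElem_mem hks
      have hvl : v ∈ l := hperm.mem_iff.mp hvs
      have hsp : s = s.take k ++ v :: s.drop (k+1) := by
        conv_lhs => rw [← List.take_append_drop k s]
        rw [← List.getElem_cons_drop hks]
      have hcle : s.countP (fun r => decide (r < v)) ≤ k := by
        have hb := countP_le_of_split (s.take k) (s.drop (k+1)) v (hsp ▸ hpair)
        have hlt : (s.take k).length = k := by
          rw [List.length_take]; omega
        calc s.countP (fun r => decide (r < v))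
            = (s.take k ++ v :: s.drop (k+1)).countP (fun r => decide (r < v)) := by rw [← hsp]
          _ ≤ (s.take k).length := hb
          _ = k := hlt
      have hc : 0 < N - (l.countP (fun r => decide (r < v)) : Int) := by
        rw [← hcnt]; omega
      have hhv : hCand N l v = v * (N - (l.countP (fun r => decide (r < v)) : Int)) := by
        unfold hCand; rw [if_pos hc]
      have hle : v * (N - (k : Int)) ≤ v * (N - (l.countP (fun r => decide (r < v)) : Int)) := by
        apply mul_le_mul_of_nonneg_left _ (le_of_lt hvpos)
        rw [← hcnt]; omega
      have hmem : hCand N l v ∈ LB := by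
        rw [hLB]; exact List.mem_map_of_mem hvl
      calc x = v * (N - (k : Int)) := by rw [← hfx, hgd]
        _ ≤ hCand N l v := by rw [hhv]; exact hle
        _ ≤ LB.foldl max 0 := mem_le_foldl_max _ _ _ hmem
    · have hx0 : x ≤ 0 := by
        rw [← hfx, hgd]
        exact mul_nonpos_of_nonpos_of_nonneg (by omega) (by omega)
      omega
  -- every B-candidate is ≤ A's fold
  have hBA : ∀ y ∈ LB, y ≤ LA.foldl max 0 := by
    intro y hy
    rw [hLB] at hy
    obtain ⟨v, hvl, hfy⟩ := List.mem_map.mp hy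
    by_cases hc : 0 < N - (l.countP (fun r => decide (r < v)) : Int)
    · have hvs : v ∈ s := hperm.mem_iff.mpr hvl
      obtain ⟨pre, post, heq, hlenpre⟩ := exists_split_sorted s hpair v hvs
      have hkn : pre.length < N.toNat := by
        have := hcnt v; omega
      have hhv : hCand N l v = v * (N - (l.countP (fun r => decide (r < v)) : Int)) := by
        unfold hCand; rw [if_pos hc]
      have hmem : v * (N - (pre.length : Int)) ∈ LA := by
        rw [hLA]
        refine List.mem_map.mpr ⟨pre.length, List.mem_range.mpr hkn, ?_⟩
        rw [heq, getD_append_length]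
      have hy' : y = v * (N - (pre.length : Int)) := by
        rw [← hfy, hhv, hlenpre, hcnt]
      rw [hy']
      exact mem_le_foldl_max _ _ _ hmem
    · have : y = 0 := by rw [← hfy]; unfold hCand; rw [if_neg hc]
      omega
  exact le_antisymm (foldl_max_le _ _ _ hRB0 hAB) (foldl_max_le _ _ _ hRA0 hBA)
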